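-- pv_equiv track=rewrite | github.com/Xiaolinger-Z/Epitome | training_evaluation/model_util.py | get_correct_predictions_word_cluster
-- ===== SOURCE A (Python) =====
-- def get_correct_predictions_word_cluster(target, prediction, word_cluster):
--     """
--     Calculate predictions based on word cluster generated by CodeWordNet.
--     """
--
--     true_positive, false_positive, false_negative = 0, 0, 0
--     replacement = dict()
--     skip = set()
--     for j, p in enumerate(prediction):
--         if p in target:
--             skip.add(j)
--     for i, t in enumerate(target):
--         for j, p in enumerate(prediction):
--             if t != p and j not in replacement and j not in skip:
--
--                 if t in word_cluster and p in word_cluster: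
--                     t_cluster = word_cluster[t]
--                     p_cluster = word_cluster[p]
--                     t_cluster, p_cluster = set(t_cluster), set(p_cluster)
--                     if len(t_cluster.intersection(p_cluster)) > 0:
--                         replacement[j] = t
--
--     for k, v in replacement.items():
--         prediction[k] = v
--     if target == prediction:
--         true_positive = len(target)
--     else:
--         target = set(target)
--         prediction = set(prediction)
--
--         true_positive += len(target.intersection(prediction))
--         false_negative += len(target.difference(prediction))
--         false_positive += len(prediction.difference(target))
--     return true_positive, false_positive, false_negative
-- ===== SOURCE B (Python) =====
-- def get_correct_predictions_word_cluster(target, prediction, word_cluster):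
--     """
--     Calculate predictions based on word cluster generated by CodeWordNet.
--     (Inverted index: one pass over targets, one pass over predictions.)
--     """
--     tset = set(target)
--     # inverted index: cluster element -> (index, word) of the FIRST target
--     # whose cluster contains that element
--     first = {}
--     for i, t in enumerate(target):
--         if t in word_cluster:
--             for e in word_cluster[t]:
--                 if e not in first:
--                     first[e] = (i, t)
--     new_prediction = []
--     for p in prediction:
--         if p in tset or p not in word_cluster:
--             new_prediction.append(p)
--             continue
--         best = None
--         for e in word_cluster[p]:
--             cand = first.get(e)
--             if cand is not None and (best is None or cand[0] < best[0]):
--                 best = cand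
--         new_prediction.append(best[1] if best is not None else p)
--     prediction[:] = new_prediction  # same in-place update as the original
--     if target == prediction:
--         return len(target), 0, 0
--     ts, ps = set(target), set(prediction)
--     return len(ts & ps), len(ps - ts), len(ts - ps)
-- ===== Notes on version B (the rewrite author's own statement) =====
-- stated objective: faster
-- what changed: Replaces the target-by-prediction nested scan (which rebuilds both cluster sets for every pair) with an inverted index from cluster element to the first target containing it, so each prediction is resolved by one pass over its own cluster.
import Mathlib
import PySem

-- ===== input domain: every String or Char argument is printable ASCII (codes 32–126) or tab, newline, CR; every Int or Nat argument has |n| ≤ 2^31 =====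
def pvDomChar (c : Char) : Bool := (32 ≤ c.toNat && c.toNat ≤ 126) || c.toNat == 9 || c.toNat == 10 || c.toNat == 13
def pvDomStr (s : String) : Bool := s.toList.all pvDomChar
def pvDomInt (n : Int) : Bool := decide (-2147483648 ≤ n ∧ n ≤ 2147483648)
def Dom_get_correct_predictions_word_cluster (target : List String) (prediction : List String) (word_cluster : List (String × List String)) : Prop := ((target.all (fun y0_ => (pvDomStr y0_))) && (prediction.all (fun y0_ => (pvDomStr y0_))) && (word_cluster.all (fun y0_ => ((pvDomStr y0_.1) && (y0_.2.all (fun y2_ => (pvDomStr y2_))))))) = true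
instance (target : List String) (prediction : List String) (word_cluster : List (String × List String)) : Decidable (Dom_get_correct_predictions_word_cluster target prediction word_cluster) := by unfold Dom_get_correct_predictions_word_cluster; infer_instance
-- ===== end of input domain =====

-- B replaces A's target-by-prediction nested scan (rebuilding both cluster sets per pair) with an
-- inverted index from cluster element to first containing target; objective: faster (asymptotic).
-- Both A and B update the `prediction` list in place (the same final content); the theorems are
-- about the returned triple.

-- ===== PORT A =====
-- word_cluster is a Python dict: association list, lookup = first match
def pvWcGet? (word_cluster : List (String × List String)) (w : String) : Option (List String) :=
  (word_cluster.find? (fun kv => kv.1 == w)).map (·.2)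

def pvSkipA (target prediction : List String) : PySem.Set Int :=
  (PySem.List.enumerate prediction).foldl
    (fun s jp => if jp.2 ∈ target then PySem.Set.add s jp.1 else s) PySem.Set.empty

def pvStepA (word_cluster : List (String × List String)) (skip : PySem.Set Int) (t : String)
    (r : PySem.Dict Int String) (jp : Int × String) : PySem.Dict Int String :=
  if (!(t == jp.2) && !(r.contains jp.1) && !(PySem.Set.contains skip jp.1)) then
    match pvWcGet? word_cluster t, pvWcGet? word_cluster jp.2 with
    | some t_cluster, some p_cluster =>
        if 0 < PySem.Set.len (PySem.Set.inter (PySem.Set.ofList t_cluster) (PySem.Set.ofList p_cluster))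
        then r.insert jp.1 t else r
    | _, _ => r
  else r

def pvReplA (target prediction : List String) (word_cluster : List (String × List String)) :
    PySem.Dict Int String :=
  (PySem.List.enumerate target).foldl
    (fun r it =>
      (PySem.List.enumerate prediction).foldl
        (pvStepA word_cluster (pvSkipA target prediction) it.2) r)
    PySem.Dict.empty

def get_correct_predictions_word_cluster (target : List String) (prediction : List String) (word_cluster : List (String × List String)) : Int × Int × Int :=
  let repl := pvReplA target prediction word_cluster
  let prediction2 := repl.items.foldl (fun l kv => PySem.List.pySetD l kv.1 kv.2) prediction
  if target == prediction2 then ((target.length : Int), 0, 0)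
  else
    let ts := PySem.Set.ofList target
    let ps := PySem.Set.ofList prediction2
    (PySem.Set.len (PySem.Set.inter ts ps),
     PySem.Set.len (PySem.Set.diff ps ts),
     PySem.Set.len (PySem.Set.diff ts ps))

-- ===== PORT B =====
def pvFirstB (target : List String) (word_cluster : List (String × List String)) :
    PySem.Dict String (Int × String) :=
  (PySem.List.enumerate target).foldl
    (fun f it =>
      match pvWcGet? word_cluster it.2 with
      | some tc => tc.foldl (fun f e => if f.contains e then f else f.insert e it) f
      | none => f)
    PySem.Dict.empty

def pvBestB (first : PySem.Dict String (Int × String)) (pc : List String) :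
    Option (Int × String) :=
  pc.foldl
    (fun best e =>
      match first.get? e with
      | none => best
      | some cand =>
        match best with
        | none => some cand
        | some b => if cand.1 < b.1 then some cand else best)
    none

def pvNewPredB (target prediction : List String) (word_cluster : List (String × List String)) :
    List String :=
  let tset := PySem.Set.ofList target
  let first := pvFirstB target word_cluster
  prediction.map (fun p =>
    if PySem.Set.contains tset p then p
    else
      match pvWcGet? word_cluster p with
      | none => p
      | some pc =>
        match pvBestB first pc with
        | some b => b.2
        | none => p)

def get_correct_predictions_word_cluster_alt (target : List String) (prediction : List String) (word_cluster : List (String × List String)) : Int × Int × Int :=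
  let new_prediction := pvNewPredB target prediction word_cluster
  if target == new_prediction then ((target.length : Int), 0, 0)
  else
    let ts := PySem.Set.ofList target
    let ps := PySem.Set.ofList new_prediction
    (PySem.Set.len (PySem.Set.inter ts ps),
     PySem.Set.len (PySem.Set.diff ps ts),
     PySem.Set.len (PySem.Set.diff ts ps))

-- ===== PRECONDITION & SPEC =====
def Spec_get_correct_predictions_word_cluster (target : List String) (prediction : List String) (word_cluster : List (String × List String)) (out : Int × Int × Int) : Prop := out = get_correct_predictions_word_cluster_alt target prediction word_cluster
instance (target : List String) (prediction : List String) (word_cluster : List (String × List String)) (out : Int × Int × Int) : Decidable (Spec_get_correct_predictions_word_cluster target prediction word_cluster out) := by unfold Spec_get_correct_predictions_word_cluster; infer_instance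

-- ===== CLAIM (what is proved, stated in full; the proofs are below) =====
def Claim_equal_get_correct_predictions_word_cluster : Prop := ∀ (target : List String) (prediction : List String) (word_cluster : List (String × List String)), Dom_get_correct_predictions_word_cluster target prediction word_cluster → Spec_get_correct_predictions_word_cluster target prediction word_cluster (get_correct_predictions_word_cluster target prediction word_cluster)

-- ===== LEMMAS AND PROOFS =====

-- the pair-matching test both programs decide: clusters of t and p share an element
def pvMatch (word_cluster : List (String × List String)) (t p : String) : Bool :=
  match pvWcGet? word_cluster t, pvWcGet? word_cluster p with
  | some tc, some pc =>
      0 < PySem.Set.len (PySem.Set.inter (PySem.Set.ofList tc) (PySem.Set.ofList pc))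
  | _, _ => false

-- e is in t's cluster
def pvInCl (word_cluster : List (String × List String)) (e t : String) : Bool :=
  match pvWcGet? word_cluster t with
  | some tc => e ∈ tc
  | none => false


-- ---- A-side lemmas ----

-- A's per-pair step, written as a single boolean test
theorem stepA_eq (wc : List (String × List String)) (skip : PySem.Set Int) (t : String)
    (r : PySem.Dict Int String) (jp : Int × String) :
    pvStepA wc skip t r jp =
      if (!(t == jp.2) && !(r.contains jp.1) && !(PySem.Set.contains skip jp.1)
          && pvMatch wc t jp.2) then r.insert jp.1 t else r := by
  unfold pvStepA pvMatch
  cases h1 : pvWcGet? wc t <;> cases h2 : pvWcGet? wc jp.2 <;>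
    simp [h1, h2] <;> split_ifs <;> simp_all

-- membership in the skip-building fold
theorem mem_skip_fold (T : List String) (l : List (Int × String)) (s0 : PySem.Set Int) (j : Int) :
    (j ∈ l.foldl (fun s jp => if jp.2 ∈ T then PySem.Set.add s jp.1 else s) s0)
      ↔ j ∈ s0 ∨ ∃ jp ∈ l, jp.2 ∈ T ∧ jp.1 = j := by
  induction l generalizing s0 with
  | nil => simp
  | cons x l ih =>
    simp only [List.foldl_cons]
    rw [ih]
    by_cases hx : x.2 ∈ T
    · simp only [hx, if_pos, PySem.Set.mem_add, List.mem_cons]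
      constructor
      · rintro ((h | h) | ⟨jp, hm, hT, hj⟩)
        · exact Or.inl h
        · exact Or.inr ⟨x, Or.inl rfl, hx, h.symm⟩
        · exact Or.inr ⟨jp, Or.inr hm, hT, hj⟩
      · rintro (h | ⟨jp, (rfl | hm), hT, hj⟩)
        · exact Or.inl (Or.inl h)
        · exact Or.inl (Or.inr hj.symm)
        · exact Or.inr ⟨jp, hm, hT, hj⟩
    · rw [if_neg hx]
      simp only [List.mem_cons]
      constructor
      · rintro (h | ⟨jp, hm, hT, hj⟩)
        · exact Or.inl h
        · exact Or.inr ⟨jp, Or.inr hm, hT, hj⟩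
      · rintro (h | ⟨jp, (rfl | hm), hT, hj⟩)
        · exact Or.inl h
        · exact absurd hT hx
        · exact Or.inr ⟨jp, hm, hT, hj⟩

theorem mem_skipA (target prediction : List String) (j : Int) :
    j ∈ pvSkipA target prediction
      ↔ ∃ (k : Nat) (_ : k < prediction.length), j = (k : Int) ∧ prediction[k] ∈ target := by
  unfold pvSkipA
  rw [mem_skip_fold]
  constructor
  · rintro (h | ⟨jp, hmem, hT, hj⟩)
    · simp [PySem.Set.empty] at h
    · rcases (PySem.List.mem_enumerate_iff _ _ _).1 hmem with ⟨k, hk, rfl⟩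
      exact ⟨k, hk, by omega, hT⟩
  · rintro ⟨k, hk, rfl, hT⟩
    refine Or.inr ⟨((k : Int), prediction[k]), ?_, hT, rfl⟩
    exact (PySem.List.mem_enumerate_iff _ _ _).2 ⟨k, hk, by simp⟩

-- the inner fold leaves keys below the start index untouched
theorem innerA_get_of_lt (wc : List (String × List String)) (skip : PySem.Set Int) (t : String)
    (ps : List String) (s j : Int) (r : PySem.Dict Int String) (h : j < s) :
    ((PySem.List.enumerate ps s).foldl (pvStepA wc skip t) r).get? j = r.get? j := by
  induction ps generalizing s r with
  | nil => simp [PySem.List.enumerate]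
  | cons p ps ih =>
    rw [PySem.List.enumerate_cons]
    simp only [List.foldl_cons]
    rw [ih (s + 1) _ (by omega), stepA_eq]
    split_ifs with hc
    · exact PySem.Dict.get?_insert_of_ne _ _ (by omega)
    · rfl

-- what one pass of the inner loop (one target t over all predictions) does to key j
theorem innerA_get (wc : List (String × List String)) (skip : PySem.Set Int) (t : String)
    (ps : List String) (s j : Int) (r : PySem.Dict Int String) :
    ((PySem.List.enumerate ps s).foldl (pvStepA wc skip t) r).get? j =
      match (PySem.List.enumerate ps s).find? (fun jp => jp.1 == j) with
      | some jp =>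
          if (!(t == jp.2) && !(r.contains j) && !(PySem.Set.contains skip j)
              && pvMatch wc t jp.2) then some t else r.get? j
      | none => r.get? j := by
  induction ps generalizing s r with
  | nil => simp [PySem.List.enumerate]
  | cons p ps ih =>
    rw [PySem.List.enumerate_cons]
    simp only [List.foldl_cons, List.find?_cons]
    by_cases hj : s = j
    · subst hj
      simp only [beq_self_eq_true]
      rw [stepA_eq]
      cases hc : (!(t == p) && !(r.contains s) && !(PySem.Set.contains skip s)
          && pvMatch wc t p) with
      | true =>
        simp only [if_true]
        rw [innerA_get_of_lt _ _ _ _ _ _ _ (by omega)]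
        simp [PySem.Dict.get?_insert_self]
      | false =>
        simp only [Bool.false_eq_true, if_false]
        rw [innerA_get_of_lt _ _ _ _ _ _ _ (by omega)]
    · have hbeq : ((s, p).1 == j) = false := by simp; omega
      simp only [hbeq]
      have hr' : (pvStepA wc skip t r (s, p)).get? j = r.get? j := by
        rw [stepA_eq]
        split_ifs with hc
        · exact PySem.Dict.get?_insert_of_ne _ _ (by omega)
        · rfl
      have hcont : (pvStepA wc skip t r (s, p)).contains j = r.contains j := by
        rw [PySem.Dict.contains_eq_isSome_get?, PySem.Dict.contains_eq_isSome_get?, hr']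
      rw [ih (s + 1) (pvStepA wc skip t r (s, p))]
      cases hfind : (PySem.List.enumerate ps (s + 1)).find? (fun jp => jp.1 == j) with
      | none => simp [hfind, hr']
      | some jp => simp [hfind, hr', hcont]


-- what the whole double loop does to key j
theorem replA_fold (wc : List (String × List String)) (skip : PySem.Set Int)
    (P : List String) (ts : List (Int × String)) (r : PySem.Dict Int String) (j : Int) :
    ((ts.foldl (fun r it => (PySem.List.enumerate P).foldl (pvStepA wc skip it.2) r) r).get? j) =
      match r.get? j with
      | some v => some v
      | none =>
        match (PySem.List.enumerate P).find? (fun jp => jp.1 == j) with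
        | some jp =>
            if PySem.Set.contains skip j then none
            else (ts.find? (fun it => !(it.2 == jp.2) && pvMatch wc it.2 jp.2)).map (·.2)
        | none => none := by
  induction ts generalizing r with
  | nil =>
    simp only [List.foldl_nil]
    cases hr : r.get? j with
    | some v => rfl
    | none =>
      cases hf : (PySem.List.enumerate P).find? (fun jp => jp.1 == j) with
      | none => rfl
      | some jp => simp
  | cons it ts ih =>
    simp only [List.foldl_cons, List.find?_cons]
    rw [ih, innerA_get]
    cases hf : (PySem.List.enumerate P).find? (fun jp => jp.1 == j) with
    | none =>
      cases hr : r.get? j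
      case none => rfl
      case some v => rfl
    | some jp =>
      cases hr : r.get? j with
      | some v =>
        have hcont : r.contains j = true := by
          rw [PySem.Dict.contains_eq_isSome_get?, hr]; rfl
        simp [hcont, hr]
      | none =>
        have hcont : r.contains j = false := by
          rw [PySem.Dict.contains_eq_isSome_get?, hr]; rfl
        cases hs : PySem.Set.contains skip j with
        | true => simp [hcont, hs, hr]
        | false =>
          cases hcond : (!(it.2 == jp.2) && pvMatch wc it.2 jp.2) with
          | true =>
            have h' : it.2 ≠ jp.2 ∧ pvMatch wc it.2 jp.2 = true := by simpa using hcond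
            have hC : (!(it.2 == jp.2) && !(r.contains j) && !false
                && pvMatch wc it.2 jp.2) = true := by
              simp [hcont, h'.1, h'.2]
            simp only [hC, if_true]
            simp [List.find?_cons, hcond]
          | false =>
            have hC : (!(it.2 == jp.2) && !(r.contains j) && !false
                && pvMatch wc it.2 jp.2) = false := by
              have h' := hcond
              rw [Bool.and_eq_false_iff] at h'
              rcases h' with h | h
              · simp only [Bool.not_eq_false'] at h
                simp [h]
              · simp [h]
            simp only [hC]
            simp [List.find?_cons, hcond]

-- a find? over enumerate by the second component, projected back
theorem find?_enumerate_snd {α : Type} (xs : List α) (s : Int) (q : α → Bool) :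
    ((PySem.List.enumerate xs s).find? (fun it => q it.2)).map (·.2) = xs.find? q := by
  induction xs generalizing s with
  | nil => simp [PySem.List.enumerate]
  | cons x xs ih =>
    rw [PySem.List.enumerate_cons]
    simp only [List.find?_cons]
    cases hq : q x <;> simp [hq, ih]

-- find? over enumerate by an in-range index key
theorem find?_enumerate_idx {α : Type} (ps : List α) (s : Int) (k : Nat) (h : k < ps.length) :
    (PySem.List.enumerate ps s).find? (fun jp => jp.1 == s + (k : Int))
      = some (s + (k : Int), ps[k]) := by
  induction ps generalizing s k with
  | nil => simp at h
  | cons p ps ih =>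
    rw [PySem.List.enumerate_cons]
    simp only [List.find?_cons]
    cases k with
    | zero => simp
    | succ k =>
      have hbeq : ((s, p).1 == s + ((k + 1 : Nat) : Int)) = false := by simp; omega
      simp only [hbeq]
      have := ih (s + 1) k (by simpa using h)
      have harith : s + 1 + (k : Int) = s + ((k + 1 : Nat) : Int) := by push_cast; ring
      rw [harith] at this
      rw [this]
      simp

theorem find?_enumerate_idx0 {α : Type} (ps : List α) (k : Nat) (h : k < ps.length) :
    (PySem.List.enumerate ps).find? (fun jp => jp.1 == (k : Int)) = some ((k : Int), ps[k]) := by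
  have := find?_enumerate_idx ps 0 k h
  simpa using this

theorem find?_enumerate_oob {α : Type} (ps : List α) (j : Int)
    (h : ¬ (0 ≤ j ∧ j < ps.length)) :
    (PySem.List.enumerate ps).find? (fun jp => jp.1 == j) = none := by
  rw [List.find?_eq_none]
  intro x hx
  rcases (PySem.List.mem_enumerate_iff _ _ _).1 hx with ⟨k, hk, rfl⟩
  simp
  omega

-- key j of A's replacement dict
theorem replA_get (target prediction : List String) (wc : List (String × List String)) (j : Int) :
    (pvReplA target prediction wc).get? j =
      match (PySem.List.enumerate prediction).find? (fun jp => jp.1 == j) with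
      | some jp =>
          if PySem.Set.contains (pvSkipA target prediction) j then none
          else target.find? (fun t => !(t == jp.2) && pvMatch wc t jp.2)
      | none => none := by
  unfold pvReplA
  rw [replA_fold]
  simp only [PySem.Dict.get?_empty]
  cases hf : (PySem.List.enumerate prediction).find? (fun jp => jp.1 == j) with
  | none => rfl
  | some jp =>
    simp only
    cases hs : PySem.Set.contains (pvSkipA target prediction) j with
    | true => rfl
    | false =>
      simp only [Bool.false_eq_true, if_false]
      exact find?_enumerate_snd target 0 (fun t => !(t == jp.2) && pvMatch wc t jp.2)

-- keys of the replacement dict stay distinct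
theorem nodup_stepA (wc : List (String × List String)) (skip : PySem.Set Int) (t : String)
    (r : PySem.Dict Int String) (jp : Int × String) (h : r.keys.Nodup) :
    (pvStepA wc skip t r jp).keys.Nodup := by
  rw [stepA_eq]
  split_ifs
  · exact PySem.Dict.nodup_keys_insert _ _ _ h
  · exact h

theorem nodup_replA (target prediction : List String) (wc : List (String × List String)) :
    (pvReplA target prediction wc).keys.Nodup := by
  unfold pvReplA
  have inner : ∀ (t : String) (l : List (Int × String)) (r : PySem.Dict Int String),
      r.keys.Nodup → (l.foldl (pvStepA wc (pvSkipA target prediction) t) r).keys.Nodup := by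
    intro t l
    induction l with
    | nil => intro r h; exact h
    | cons x l ih => intro r h; exact ih _ (nodup_stepA _ _ _ _ _ h)
  have outer : ∀ (l : List (Int × String)) (r : PySem.Dict Int String),
      r.keys.Nodup → ((l.foldl (fun r it =>
        (PySem.List.enumerate prediction).foldl
          (pvStepA wc (pvSkipA target prediction) it.2) r) r).keys.Nodup) := by
    intro l
    induction l with
    | nil => intro r h; exact h
    | cons x l ih => intro r h; exact ih _ (inner _ _ _ h)
  exact outer _ _ (by simp [PySem.Dict.keys_empty])


-- writing an association list of distinct nonnegative keys into a list, elementwise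
theorem apply_getElem? (kvs : List (Int × String)) (l : List String) (m : Nat)
    (hnd : (kvs.map (·.1)).Nodup) (hpos : ∀ kv ∈ kvs, 0 ≤ kv.1) :
    (kvs.foldl (fun l kv => PySem.List.pySetD l kv.1 kv.2) l)[m]? =
      match kvs.find? (fun kv => kv.1 == (m : Int)) with
      | some kv => if m < l.length then some kv.2 else none
      | none => l[m]? := by
  induction kvs generalizing l with
  | nil => cases hl : l[m]? <;> simp [hl]
  | cons kv kvs ih =>
    simp only [List.foldl_cons, List.find?_cons]
    have hk0 : 0 ≤ kv.1 := hpos kv (List.mem_cons_self)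
    rw [PySem.List.pySetD_of_nonneg _ _ hk0]
    simp only [List.map_cons, List.nodup_cons] at hnd
    by_cases hk : kv.1 = (m : Int)
    · have hbeq : (kv.1 == (m : Int)) = true := by simpa using hk
      simp only [hbeq]
      have hnone : kvs.find? (fun kv => kv.1 == (m : Int)) = none := by
        rw [List.find?_eq_none]
        intro x hx
        simp only [beq_iff_eq]
        intro hx1
        have hmm : x.1 ∈ List.map (fun x => x.1) kvs := List.mem_map_of_mem hx
        rw [hx1, ← hk] at hmm
        exact hnd.1 hmm
      rw [ih _ hnd.2 (fun kv h => hpos kv (List.mem_cons_of_mem _ h)), hnone]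
      have htn : kv.1.toNat = m := by omega
      by_cases hm : m < l.length
      · rw [htn, List.getElem?_set_self (by simpa using hm)]
        simp [hm]
      · rw [List.getElem?_eq_none (by simp only [List.length_set]; omega)]
        simp [hm]
    · have hbeq : (kv.1 == (m : Int)) = false := by simpa using hk
      simp only [hbeq]
      rw [ih _ hnd.2 (fun kv h => hpos kv (List.mem_cons_of_mem _ h))]
      have hne : kv.1.toNat ≠ m := by omega
      rw [List.getElem?_set_ne hne]
      simp

-- every key of A's replacement dict is a valid prediction index
theorem replA_key_range (target prediction : List String) (wc : List (String × List String))
    (j : Int) (v : String) (h : (pvReplA target prediction wc).get? j = some v) :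
    0 ≤ j ∧ j < prediction.length := by
  by_contra hc
  rw [replA_get, find?_enumerate_oob _ _ (by omega)] at h
  simp at h

-- ---- B-side lemmas ----

-- the inner fold of pvFirstB: insert-if-absent over one cluster
theorem firstB_inner (it : Int × String) (tc : List String)
    (f : PySem.Dict String (Int × String)) (e : String) :
    ((tc.foldl (fun f e' => if f.contains e' then f else f.insert e' it) f).get? e)
      = if e ∈ tc ∧ f.contains e = false then some it else f.get? e := by
  induction tc generalizing f with
  | nil => simp
  | cons e' tc ih =>
    simp only [List.foldl_cons]
    by_cases he : e' = e
    · subst he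
      cases hc : f.contains e' with
      | true =>
        simp only [hc]
        rw [ih]
        simp [hc]
      | false =>
        simp only [hc]
        rw [ih]
        have hc' : (f.insert e' it).contains e' = true := by
          rw [PySem.Dict.contains_eq_isSome_get?, PySem.Dict.get?_insert_self]
          rfl
        simp [hc', hc, PySem.Dict.get?_insert_self]
    · have hget : ∀ f' : PySem.Dict String (Int × String),
          (if f.contains e' then f else f.insert e' it).get? e = f.get? e := by
        intro _
        split_ifs
        · rfl
        · exact PySem.Dict.get?_insert_of_ne _ _ (fun h => he h.symm)
      have hcont : (if f.contains e' then f else f.insert e' it).contains e = f.contains e := by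
        split_ifs
        · rfl
        · rw [PySem.Dict.contains_eq_isSome_get?,
            PySem.Dict.get?_insert_of_ne _ _ (fun h => he h.symm),
            ← PySem.Dict.contains_eq_isSome_get?]
      rw [ih, hget f, hcont]
      have he' : ¬ e = e' := fun h => he h.symm
      simp [he']

-- pvFirstB: element e maps to the first enumerated target whose cluster holds e
theorem firstB_fold (wc : List (String × List String)) (ts : List (Int × String))
    (f : PySem.Dict String (Int × String)) (e : String) :
    ((ts.foldl (fun f it =>
        match pvWcGet? wc it.2 with
        | some tc => tc.foldl (fun f e => if f.contains e then f else f.insert e it) f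
        | none => f) f).get? e)
      = match f.get? e with
        | some v => some v
        | none => ts.find? (fun it => pvInCl wc e it.2) := by
  induction ts generalizing f with
  | nil => cases hf : f.get? e <;> simp [hf]
  | cons it ts ih =>
    simp only [List.foldl_cons, List.find?_cons]
    rw [ih]
    cases hwc : pvWcGet? wc it.2 with
    | none =>
      have hin : pvInCl wc e it.2 = false := by simp [pvInCl, hwc]
      simp only [hin]
    | some tc =>
      rw [firstB_inner]
      cases hf : f.get? e with
      | some v =>
        have hc : f.contains e = true := by
          rw [PySem.Dict.contains_eq_isSome_get?, hf]; rfl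
        simp [hc, hf]
      | none =>
        have hc : f.contains e = false := by
          rw [PySem.Dict.contains_eq_isSome_get?, hf]; rfl
        cases hin : pvInCl wc e it.2 with
        | true =>
          have he : e ∈ tc := by simpa [pvInCl, hwc] using hin
          simp [he, hc]
        | false =>
          have he : e ∉ tc := by simpa [pvInCl, hwc] using hin
          simp [he, hf]

theorem firstB_get (target : List String) (wc : List (String × List String)) (e : String) :
    (pvFirstB target wc).get? e
      = (PySem.List.enumerate target).find? (fun it => pvInCl wc e it.2) := by
  unfold pvFirstB
  rw [firstB_fold]
  simp [PySem.Dict.get?_empty]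


-- find? on a key-sorted list returns the minimal-key satisfier
theorem find?_min_fst {α : Type} (l : List (Int × α)) (q : Int × α → Bool)
    (hp : l.Pairwise (fun a b => a.1 < b.1)) (c : Int × α) (hf : l.find? q = some c) :
    ∀ x ∈ l, q x = true → c.1 ≤ x.1 := by
  induction l with
  | nil => simp at hf
  | cons a l ih =>
    rw [List.find?_cons] at hf
    rw [List.pairwise_cons] at hp
    cases hq : q a with
    | true =>
      simp only [hq] at hf
      injection hf with hf
      subst hf
      intro x hx _
      rcases List.mem_cons.1 hx with rfl | hx
      · exact le_refl _
      · exact (hp.1 x hx).le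
    | false =>
      simp only [hq] at hf
      intro x hx hqx
      rcases List.mem_cons.1 hx with rfl | hx
      · rw [hqx] at hq; cases hq
      · exact ih hp.2 hf x hx hqx

-- on a key-sorted list the key determines the element
theorem fst_inj_of_pairwise {α : Type} (l : List (Int × α))
    (hp : l.Pairwise (fun a b => a.1 < b.1)) :
    ∀ a ∈ l, ∀ b ∈ l, a.1 = b.1 → a = b := by
  intro a ha b hb he
  by_contra hne
  have hp' : l.Pairwise (fun x y => x.1 ≠ y.1) := hp.imp (fun h => ne_of_lt h)
  exact (hp'.forall (fun x y h => Ne.symm h) ha hb hne) he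

-- B's min-fold returns none iff no cluster element hits the index
theorem bestB_none_iff (first : PySem.Dict String (Int × String)) (pc : List String)
    (acc : Option (Int × String)) :
    (pc.foldl (fun best e =>
        match first.get? e with
        | none => best
        | some cand =>
          match best with
          | none => some cand
          | some b => if cand.1 < b.1 then some cand else best) acc) = none
      ↔ acc = none ∧ ∀ e ∈ pc, first.get? e = none := by
  induction pc generalizing acc with
  | nil => simp
  | cons e pc ih =>
    simp only [List.foldl_cons]
    rw [ih]
    cases hg : first.get? e with
    | none => simp [hg, List.forall_mem_cons]
    | some cand =>
      cases acc with
      | none => simp [hg, List.forall_mem_cons]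
      | some b =>
        dsimp only
        split_ifs <;> simp [hg, List.forall_mem_cons]

-- B's min-fold: the result is a candidate and a lower bound on all candidates
theorem bestB_some_spec (first : PySem.Dict String (Int × String)) (pc : List String) :
    ∀ (acc : Option (Int × String)) (b : Int × String),
    (pc.foldl (fun best e =>
        match first.get? e with
        | none => best
        | some cand =>
          match best with
          | none => some cand
          | some b => if cand.1 < b.1 then some cand else best) acc) = some b →
      (acc = some b ∨ ∃ e ∈ pc, first.get? e = some b)
      ∧ (∀ a, acc = some a → b.1 ≤ a.1)
      ∧ (∀ e ∈ pc, ∀ c, first.get? e = some c → b.1 ≤ c.1) := by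
  induction pc with
  | nil =>
    intro acc b h
    simp only [List.foldl_nil] at h
    subst h
    refine ⟨Or.inl rfl, fun a ha => by injection ha with ha; subst ha; exact le_refl _, by simp⟩
  | cons e pc ih =>
    intro acc b h
    simp only [List.foldl_cons] at h
    cases hg : first.get? e with
    | none =>
      simp only [hg] at h
      obtain ⟨h1, h2, h3⟩ := ih acc b h
      refine ⟨?_, h2, ?_⟩
      · rcases h1 with h1 | ⟨e', he', hg'⟩
        · exact Or.inl h1
        · exact Or.inr ⟨e', List.mem_cons_of_mem _ he', hg'⟩
      · intro e' he' c hc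
        rcases List.mem_cons.1 he' with rfl | he'
        · rw [hg] at hc; cases hc
        · exact h3 e' he' c hc
    | some cand =>
      simp only [hg] at h
      cases acc with
      | none =>
        obtain ⟨h1, h2, h3⟩ := ih (some cand) b h
        refine ⟨?_, ?_, ?_⟩
        · right
          rcases h1 with hb | ⟨e', he', hg'⟩
          · injection hb with hb; subst hb; exact ⟨e, List.mem_cons_self, hg⟩
          · exact ⟨e', List.mem_cons_of_mem _ he', hg'⟩
        · intro a ha; cases ha
        · intro e' he' c hc
          rcases List.mem_cons.1 he' with rfl | he'
          · rw [hg] at hc; injection hc with hc; subst hc; exact h2 cand rfl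
          · exact h3 e' he' c hc
      | some a0 =>
        dsimp only at h
        by_cases hlt : cand.1 < a0.1
        · rw [if_pos hlt] at h
          obtain ⟨h1, h2, h3⟩ := ih (some cand) b h
          refine ⟨?_, ?_, ?_⟩
          · right
            rcases h1 with hb | ⟨e', he', hg'⟩
            · injection hb with hb; subst hb; exact ⟨e, List.mem_cons_self, hg⟩
            · exact ⟨e', List.mem_cons_of_mem _ he', hg'⟩
          · intro a ha
            injection ha with ha; subst ha
            have := h2 cand rfl; omega
          · intro e' he' c hc
            rcases List.mem_cons.1 he' with rfl | he'
            · rw [hg] at hc; injection hc with hc; subst hc; exact h2 cand rfl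
            · exact h3 e' he' c hc
        · rw [if_neg hlt] at h
          obtain ⟨h1, h2, h3⟩ := ih (some a0) b h
          refine ⟨?_, h2, ?_⟩
          · rcases h1 with hb | ⟨e', he', hg'⟩
            · exact Or.inl hb
            · exact Or.inr ⟨e', List.mem_cons_of_mem _ he', hg'⟩
          · intro e' he' c hc
            rcases List.mem_cons.1 he' with rfl | he'
            · rw [hg] at hc; injection hc with hc; subst hc
              have := h2 a0 rfl; omega
            · exact h3 e' he' c hc

-- B's min-fold over p's cluster = first enumerated target matching any cluster element
theorem bestB_eq (target : List String) (wc : List (String × List String)) (pc : List String) :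
    pvBestB (pvFirstB target wc) pc
      = (PySem.List.enumerate target).find? (fun it => pc.any (fun e => pvInCl wc e it.2)) := by
  have hpF : (PySem.List.enumerate target).Pairwise (fun a b => a.1 < b.1) :=
    PySem.List.pairwise_lt_enumerate _ _
  cases hg : (PySem.List.enumerate target).find? (fun it => pc.any (fun e => pvInCl wc e it.2)) with
  | none =>
    rw [List.find?_eq_none] at hg
    unfold pvBestB
    rw [bestB_none_iff]
    refine ⟨rfl, ?_⟩
    intro e he
    cases hge : (pvFirstB target wc).get? e with
    | none => rfl
    | some c =>
      exfalso
      rw [firstB_get] at hge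
      have hc2 : pvInCl wc e c.2 = true := List.find?_some (p := fun (it : Int × String) => pvInCl wc e it.2) hge
      have hcm : c ∈ PySem.List.enumerate target := List.mem_of_find?_eq_some hge
      exact (hg c hcm) (List.any_eq_true.2 ⟨e, he, hc2⟩)
  | some it0 =>
    have hmem : it0 ∈ PySem.List.enumerate target := List.mem_of_find?_eq_some hg
    have hq : (pc.any (fun e => pvInCl wc e it0.2)) = true :=
      List.find?_some (p := fun (it : Int × String) => pc.any (fun e => pvInCl wc e it.2)) hg
    rcases List.any_eq_true.1 hq with ⟨e0, he0, hin0⟩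
    cases hr : pvBestB (pvFirstB target wc) pc with
    | none =>
      exfalso
      unfold pvBestB at hr
      have h0 := ((bestB_none_iff _ pc none).1 hr).2 e0 he0
      rw [firstB_get, List.find?_eq_none] at h0
      exact (h0 it0 hmem) hin0
    | some b =>
      unfold pvBestB at hr
      obtain ⟨h1, h2, h3⟩ := bestB_some_spec _ pc none b hr
      rcases h1 with hb | ⟨e1, he1, hg1⟩
      · cases hb
      · rw [firstB_get] at hg1
        have hbm : b ∈ PySem.List.enumerate target := List.mem_of_find?_eq_some hg1
        have hbq : pvInCl wc e1 b.2 = true := List.find?_some (p := fun (it : Int × String) => pvInCl wc e1 it.2) hg1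
        have h4 : it0.1 ≤ b.1 :=
          find?_min_fst _ _ hpF it0 hg b hbm (List.any_eq_true.2 ⟨e1, he1, hbq⟩)
        cases hge0 : (pvFirstB target wc).get? e0 with
        | none =>
          exfalso
          rw [firstB_get, List.find?_eq_none] at hge0
          exact (hge0 it0 hmem) hin0
        | some c0 =>
          have hb5 : b.1 ≤ c0.1 := h3 e0 he0 c0 hge0
          have h6 : c0.1 ≤ it0.1 := by
            rw [firstB_get] at hge0
            exact find?_min_fst _ _ hpF c0 hge0 it0 hmem hin0
          rw [fst_inj_of_pairwise _ hpF b hbm it0 hmem (by omega)]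


-- the two programs' pair tests agree: shared cluster element = some element of p's cluster hits t
theorem match_eq_any (wc : List (String × List String)) (t p : String) (pc : List String)
    (hp : pvWcGet? wc p = some pc) :
    pvMatch wc t p = pc.any (fun e => pvInCl wc e t) := by
  unfold pvMatch
  cases ht : pvWcGet? wc t with
  | none =>
    simp only [hp]
    have h0 : ∀ e, pvInCl wc e t = false := fun e => by simp [pvInCl, ht]
    simp [h0]
  | some tc =>
    simp only [hp]
    by_cases hex : ∃ e ∈ pc, e ∈ tc
    · obtain ⟨e, he, het⟩ := hex
      have hmem : e ∈ PySem.Set.inter (PySem.Set.ofList tc) (PySem.Set.ofList pc) :=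
        (PySem.Set.mem_inter _ _ _).2
          ⟨(PySem.Set.mem_ofList _ _).2 het, (PySem.Set.mem_ofList _ _).2 he⟩
      have hlen : 0 < PySem.Set.len (PySem.Set.inter (PySem.Set.ofList tc) (PySem.Set.ofList pc)) := by
        have h := List.length_pos_of_mem hmem
        have hrw : PySem.Set.len (PySem.Set.inter (PySem.Set.ofList tc) (PySem.Set.ofList pc))
            = ((PySem.Set.inter (PySem.Set.ofList tc) (PySem.Set.ofList pc)).length : Int) := rfl
        rw [hrw]
        exact Int.natCast_pos.mpr h
      have hany : pc.any (fun e => pvInCl wc e t) = true :=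
        List.any_eq_true.2 ⟨e, he, by simp [pvInCl, ht, het]⟩
      simp [hany]
      exact List.length_pos_of_mem hmem
    · have hlen : ¬ 0 < PySem.Set.len (PySem.Set.inter (PySem.Set.ofList tc) (PySem.Set.ofList pc)) := by
        intro hpos
        have hpos' : 0 < (PySem.Set.inter (PySem.Set.ofList tc) (PySem.Set.ofList pc)).length := by
          have hrw : PySem.Set.len (PySem.Set.inter (PySem.Set.ofList tc) (PySem.Set.ofList pc))
              = ((PySem.Set.inter (PySem.Set.ofList tc) (PySem.Set.ofList pc)).length : Int) := rfl
          rw [hrw] at hpos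
          exact Int.natCast_pos.mp hpos
        obtain ⟨y, hy⟩ := List.exists_mem_of_length_pos hpos'
        rw [PySem.Set.mem_inter, PySem.Set.mem_ofList, PySem.Set.mem_ofList] at hy
        exact hex ⟨y, hy.2, hy.1⟩
      have hany : pc.any (fun e => pvInCl wc e t) = false := by
        rw [List.any_eq_false]
        intro e he
        simp only [pvInCl, ht, Bool.not_eq_true]
        cases hel : (decide (e ∈ tc)) with
        | false => simp at hel; simp [hel]
        | true => exact absurd ⟨e, he, by simpa using hel⟩ hex
      simp [hany]
      rw [List.eq_nil_iff_forall_not_mem]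
      intro y hy
      rw [PySem.Set.mem_inter, PySem.Set.mem_ofList, PySem.Set.mem_ofList] at hy
      exact hex ⟨y, hy.2, hy.1⟩

-- for p outside target, A's extra t ≠ p test is vacuous
theorem find?_target_congr (T : List String) (p : String) (wc : List (String × List String))
    (hp : p ∉ T) :
    T.find? (fun t => !(t == p) && pvMatch wc t p) = T.find? (fun t => pvMatch wc t p) := by
  induction T with
  | nil => rfl
  | cons t T ih =>
    have h1 : t ≠ p := fun h => hp (h ▸ List.mem_cons_self)
    have h2 : p ∉ T := fun h => hp (List.mem_cons_of_mem _ h)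
    simp only [List.find?_cons]
    have hne : (t == p) = false := by simpa using h1
    simp only [hne, Bool.not_false, Bool.true_and]
    rw [ih h2]

-- skip holds index m exactly when prediction[m] occurs in target
theorem skipA_contains (target prediction : List String) (m : Nat) (hm : m < prediction.length) :
    PySem.Set.contains (pvSkipA target prediction) (m : Int)
      = decide (prediction[m] ∈ target) := by
  by_cases h : prediction[m] ∈ target
  · have hmem : ((m : Nat) : Int) ∈ pvSkipA target prediction :=
      (mem_skipA _ _ _).2 ⟨m, hm, rfl, h⟩
    rw [(PySem.Set.contains_iff _ _).2 hmem]
    simp [h]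
  · have hnot : ((m : Nat) : Int) ∉ pvSkipA target prediction := by
      intro hmem
      rcases (mem_skipA _ _ _).1 hmem with ⟨k, hk, hkm, hT⟩
      have hk2 : k = m := by exact_mod_cast hkm.symm
      subst hk2
      exact h hT
    have hc : PySem.Set.contains (pvSkipA target prediction) (m : Int) = false := by
      cases hcc : PySem.Set.contains (pvSkipA target prediction) (m : Int) with
      | false => rfl
      | true => exact absurd ((PySem.Set.contains_iff _ _).1 hcc) hnot
    rw [hc]
    simp [h]

-- items.find? on the replacement dict, through get?
theorem replA_items_find? (target prediction : List String)
    (wc : List (String × List String)) (m : Nat) :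
    (pvReplA target prediction wc).items.find? (fun kv => kv.1 == (m : Int)) =
      match (pvReplA target prediction wc).get? (m : Int) with
      | some v => some ((m : Int), v)
      | none => none := by
  have hnd : (pvReplA target prediction wc).keys.Nodup := nodup_replA _ _ _
  cases hv : (pvReplA target prediction wc).get? (m : Int) with
  | some v =>
    have hmem : ((m : Int), v) ∈ (pvReplA target prediction wc).items :=
      PySem.Dict.mem_items_of_get?_eq_some _ hv
    cases hf : (pvReplA target prediction wc).items.find? (fun kv => kv.1 == (m : Int)) with
    | none =>
      exfalso
      rw [List.find?_eq_none] at hf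
      exact (hf _ hmem) (by simp)
    | some kv =>
      have h1 : kv ∈ (pvReplA target prediction wc).items := List.mem_of_find?_eq_some hf
      have h2 : (kv.1 == (m : Int)) = true :=
        List.find?_some (p := fun (kv : Int × String) => kv.1 == (m : Int)) hf
      have h3 : kv.1 = (m : Int) := by simpa using h2
      have h4 : (pvReplA target prediction wc).get? kv.1 = some kv.2 :=
        PySem.Dict.get?_of_mem_items _ h1 hnd
      rw [h3, hv] at h4
      injection h4 with h4
      simp only
      rw [show kv = ((m : Int), v) from Prod.ext h3 h4.symm]
  | none =>
    rw [List.find?_eq_none]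
    intro kv hkv hbeq
    have h3 : kv.1 = (m : Int) := by simpa using hbeq
    have h4 : (pvReplA target prediction wc).get? kv.1 = some kv.2 :=
      PySem.Dict.get?_of_mem_items _ hkv hnd
    rw [h3, hv] at h4
    cases h4

theorem pred2_eq_newPred (target prediction : List String)
    (word_cluster : List (String × List String)) :
    (pvReplA target prediction word_cluster).items.foldl
      (fun l kv => PySem.List.pySetD l kv.1 kv.2) prediction
    = pvNewPredB target prediction word_cluster := by
  have hnd : ((pvReplA target prediction word_cluster).items.map (·.1)).Nodup :=
    nodup_replA target prediction word_cluster
  have hpos : ∀ kv ∈ (pvReplA target prediction word_cluster).items, 0 ≤ kv.1 := by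
    intro kv hkv
    have hget : (pvReplA target prediction word_cluster).get? kv.1 = some kv.2 :=
      PySem.Dict.get?_of_mem_items _ hkv (nodup_replA target prediction word_cluster)
    exact (replA_key_range _ _ _ _ _ hget).1
  apply List.ext_getElem?
  intro m
  rw [apply_getElem? _ _ m hnd hpos, replA_items_find?]
  simp only [pvNewPredB, List.getElem?_map]
  by_cases hm : m < prediction.length
  · have hgetm : prediction[m]? = some prediction[m] := List.getElem?_eq_getElem hm
    rw [replA_get, find?_enumerate_idx0 prediction m hm]
    dsimp only
    rw [skipA_contains _ _ m hm]
    by_cases hT : prediction[m] ∈ target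
    · simp only [hT, decide_true, if_true]
      rw [hgetm]
      have hcon : PySem.Set.contains (PySem.Set.ofList target) prediction[m] = true := by
        rw [PySem.Set.contains_iff, PySem.Set.mem_ofList]; exact hT
      simp [hcon]
      intro h
      exact absurd hT h
    · simp only [hT, decide_false, Bool.false_eq_true, if_false]
      rw [find?_target_congr _ _ _ hT]
      have hcon : PySem.Set.contains (PySem.Set.ofList target) prediction[m] = false := by
        cases hcc : PySem.Set.contains (PySem.Set.ofList target) prediction[m] with
        | false => rfl
        | true =>
          exact absurd ((PySem.Set.mem_ofList _ _).1 ((PySem.Set.contains_iff _ _).1 hcc)) hT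
      rw [hgetm]
      simp only [Option.map_some]
      rw [hcon]
      simp only [Bool.false_eq_true, if_false]
      cases hwc : pvWcGet? word_cluster prediction[m] with
      | none =>
        have hfnone : target.find? (fun t => pvMatch word_cluster t prediction[m]) = none := by
          rw [List.find?_eq_none]
          intro t _
          unfold pvMatch
          cases htl : pvWcGet? word_cluster t <;> simp [hwc, htl]
        rw [hfnone]
      | some pc =>
        dsimp only
        have hpred : (fun (it : Int × String) => pc.any (fun e => pvInCl word_cluster e it.2))
            = (fun (it : Int × String) => pvMatch word_cluster it.2 prediction[m]) :=
          funext fun it => (match_eq_any word_cluster it.2 prediction[m] pc hwc).symm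
        have hB := bestB_eq target word_cluster pc
        rw [hpred] at hB
        rw [hB]
        have hsnd := find?_enumerate_snd target 0
          (fun t => pvMatch word_cluster t prediction[m])
        cases hE : (PySem.List.enumerate target).find?
            (fun it => pvMatch word_cluster it.2 prediction[m]) with
        | none =>
          rw [hE] at hsnd
          rw [← hsnd]
          rfl
        | some it0 =>
          rw [hE] at hsnd
          rw [← hsnd]
          simp [hm]
  · have hoob : prediction[m]? = none := List.getElem?_eq_none (by omega)
    have hget : (pvReplA target prediction word_cluster).get? (m : Int) = none := by
      cases hv : (pvReplA target prediction word_cluster).get? (m : Int) with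
      | none => rfl
      | some v =>
        exfalso
        have := replA_key_range _ _ _ _ _ hv
        omega
    rw [hget, hoob]
    rfl

-- ===== VERDICT (by name: the statement is the Claim_ definition above) =====
theorem get_correct_predictions_word_cluster_spec : Claim_equal_get_correct_predictions_word_cluster := by
  intro target prediction word_cluster _
  show _ = _
  unfold get_correct_predictions_word_cluster get_correct_predictions_word_cluster_alt
  simp only [pred2_eq_newPred]
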